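-- pv_equiv track=rewrite | github.com/jeelpatel22/Strategic-Grid-Game---Python | a1_partd.py | get_overflow_list
-- ===== SOURCE A (Python) =====
-- def get_overflow_list(grid, r=0, c=0, overflow_list=None):
--     if overflow_list is None:
--         overflow_list = []
--
--
--     def count_surrounding_cells(row, col):
--         return sum(
--             1
--             for dr, dc in [(1, 0), (-1, 0), (0, 1), (0, -1)]
--             if 0 <= row + dr < len(grid) and 0 <= col + dc < len(grid[0])
--         )
--
--     if r < len(grid):
--         if c < len(grid[0]):
--             count = count_surrounding_cells(r, c)
--
--             if abs(grid[r][c]) >= count: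
--                 overflow_list.append((r, c))
--
--             get_overflow_list(grid, r, c + 1, overflow_list)
--         else:
--
--             get_overflow_list(grid, r + 1, 0, overflow_list)
--
--     return overflow_list if overflow_list else None
-- ===== SOURCE B (Python) =====
-- # Iterative row-major scan (same return value and same in-place appends as the
-- # recursive original; equivalence is about the return value).
-- def get_overflow_list(grid, r=0, c=0, overflow_list=None):
--     if overflow_list is None:
--         overflow_list = []
--     rows = len(grid)
--     if r < rows:
--         cols = len(grid[0])
--         for row in range(r, rows):
--             col = c if row == r else 0
--             while col < cols:
--                 count = sum(1 for nr, nc in ((row - 1, col), (row + 1, col),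
--                                              (row, col - 1), (row, col + 1))
--                             if 0 <= nr < rows and 0 <= nc < cols)
--                 if abs(grid[row][col]) >= count:
--                     overflow_list.append((row, col))
--                 col += 1
--     return overflow_list or None
-- ===== Notes on version B (the rewrite author's own statement) =====
-- stated objective: simpler
-- what changed: Replaces A's one-call-per-cell recursion (with its inner generator-based neighbour count over a delta list) by a plain iterative row-major scan: a for-loop over the rows from r and a while-loop over the columns, counting neighbours from the four neighbour coordinates directly.
import Mathlib
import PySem

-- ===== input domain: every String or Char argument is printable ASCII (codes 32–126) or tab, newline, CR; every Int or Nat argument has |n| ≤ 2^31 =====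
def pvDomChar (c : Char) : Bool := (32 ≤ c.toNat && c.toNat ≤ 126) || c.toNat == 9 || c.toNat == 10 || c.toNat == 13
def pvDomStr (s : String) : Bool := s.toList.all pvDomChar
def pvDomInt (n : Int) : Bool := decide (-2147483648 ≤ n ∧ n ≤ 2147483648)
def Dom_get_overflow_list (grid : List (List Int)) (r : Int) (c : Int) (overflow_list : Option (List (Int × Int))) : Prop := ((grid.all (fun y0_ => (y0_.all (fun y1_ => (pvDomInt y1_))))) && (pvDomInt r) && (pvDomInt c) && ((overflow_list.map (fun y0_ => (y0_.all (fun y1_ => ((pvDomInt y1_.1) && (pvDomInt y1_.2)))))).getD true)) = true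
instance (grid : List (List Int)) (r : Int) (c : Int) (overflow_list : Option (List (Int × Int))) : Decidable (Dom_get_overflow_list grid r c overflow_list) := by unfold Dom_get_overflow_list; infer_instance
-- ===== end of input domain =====

-- B replaces A's per-cell recursion by an iterative row-major double loop (objective: simpler);
-- both A and B append to a caller-supplied list in place — the equivalence proved is about the return value.

-- ===== PORT A =====
-- grid[row][col], with Python negative indexing; default 0/[] only reached outside Pre_
def pvCell (grid : List (List Int)) (row col : Int) : Int :=
  (PySem.List.pyGet? ((PySem.List.pyGet? grid row).getD []) col).getD 0

-- count_surrounding_cells: sum over the delta list, in A's order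
def pvCountA (grid : List (List Int)) (row col : Int) : Int :=
  [((1:Int),(0:Int)), (-1,0), (0,1), (0,-1)].foldl
    (fun s d => if 0 ≤ row + d.1 ∧ row + d.1 < (grid.length : Int) ∧
                   0 ≤ col + d.2 ∧ col + d.2 < ((grid.headD []).length : Int) then s + 1 else s) 0

def pvGoA (grid : List (List Int)) (r c : Int) (acc : List (Int × Int)) : List (Int × Int) :=
  if hr : r < (grid.length : Int) then
    if hc : c < ((grid.headD []).length : Int) then
      pvGoA grid r (c + 1)
        (if pvCountA grid r c ≤ |pvCell grid r c| then acc ++ [(r, c)] else acc)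
    else
      pvGoA grid (r + 1) 0 acc
  else acc
termination_by (((grid.length : Int) - r).toNat, (((grid.headD []).length : Int) - c).toNat)
decreasing_by
  · exact Prod.Lex.right _ (by omega)
  · exact Prod.Lex.left _ _ (by omega)

def get_overflow_list (grid : List (List Int)) (r : Int) (c : Int) (overflow_list : Option (List (Int × Int))) : Option (List (Int × Int)) :=
  let res := pvGoA grid r c (overflow_list.getD [])
  if res = [] then none else some res

-- ===== PORT B =====
-- B's neighbour count: sum over the four neighbour coordinates
def pvCountB (rows cols row col : Int) : Int :=
  [(row - 1, col), (row + 1, col), (row, col - 1), (row, col + 1)].foldl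
    (fun s p => if 0 ≤ p.1 ∧ p.1 < rows ∧ 0 ≤ p.2 ∧ p.2 < cols then s + 1 else s) 0

-- the inner 'while col < cols' loop of B
def pvScanRow (grid : List (List Int)) (rows cols row col : Int) (acc : List (Int × Int)) : List (Int × Int) :=
  if _h : col < cols then
    pvScanRow grid rows cols row (col + 1)
      (if pvCountB rows cols row col ≤ |pvCell grid row col| then acc ++ [(row, col)] else acc)
  else acc
termination_by (cols - col).toNat
decreasing_by omega

def get_overflow_list_alt (grid : List (List Int)) (r : Int) (c : Int) (overflow_list : Option (List (Int × Int))) : Option (List (Int × Int)) :=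
  let res :=
    if r < (grid.length : Int) then
      (PySem.List.pyRange r (grid.length : Int) 1).foldl
        (fun acc row =>
          pvScanRow grid (grid.length : Int) ((grid.headD []).length : Int) row
            (if row == r then c else 0) acc)
        (overflow_list.getD [])
    else overflow_list.getD []
  if res = [] then none else some res

-- ===== PRECONDITION & SPEC =====
-- length of grid[i] under Python indexing (0 when i is out of range)
def pvLrow (grid : List (List Int)) (i : Int) : Int :=
  (((PySem.List.pyGet? grid i).getD []).length : Int)

-- Pre_ excludes exactly the inputs on which the Python A raises IndexError
-- (empty grid with r < len(grid), rows too short for the columns visited, row index below -len(grid)).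
def Pre_get_overflow_list (grid : List (List Int)) (r : Int) (c : Int) (overflow_list : Option (List (Int × Int))) : Prop :=
  (grid.length : Int) ≤ r ∨
  ( grid ≠ [] ∧
    (c < ((grid.headD []).length : Int) →
       (-(grid.length : Int) ≤ r ∧ ((grid.headD []).length : Int) ≤ pvLrow grid r ∧ -c ≤ pvLrow grid r)) ∧
    (0 < ((grid.headD []).length : Int) →
       ((-(grid.length : Int) ≤ r + 1 ∨ (grid.length : Int) ≤ r + 1) ∧
        ∀ j ∈ List.range grid.length,
          (r + 1 ≤ (j : Int) → ((grid.headD []).length : Int) ≤ pvLrow grid j) ∧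
          (r + 1 ≤ (j : Int) - (grid.length : Int) → ((grid.headD []).length : Int) ≤ pvLrow grid j))) )
instance (grid : List (List Int)) (r : Int) (c : Int) (overflow_list : Option (List (Int × Int))) : Decidable (Pre_get_overflow_list grid r c overflow_list) := by
  unfold Pre_get_overflow_list; infer_instance

def pvWitness_get_overflow_list : List (List Int) × Int × Int × (Option (List (Int × Int))) :=
  ([[2, 0], [1, 3]], 0, 0, none)

def Spec_get_overflow_list (grid : List (List Int)) (r : Int) (c : Int) (overflow_list : Option (List (Int × Int))) (out : Option (List (Int × Int))) : Prop := out = get_overflow_list_alt grid r c overflow_list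
instance (grid : List (List Int)) (r : Int) (c : Int) (overflow_list : Option (List (Int × Int))) (out : Option (List (Int × Int))) : Decidable (Spec_get_overflow_list grid r c overflow_list out) := by unfold Spec_get_overflow_list; infer_instance

-- ===== CLAIM (what is proved, stated in full; the proofs are below) =====
def Claim_equal_get_overflow_list : Prop := ∀ (grid : List (List Int)) (r : Int) (c : Int) (overflow_list : Option (List (Int × Int))), Dom_get_overflow_list grid r c overflow_list → Pre_get_overflow_list grid r c overflow_list → Spec_get_overflow_list grid r c overflow_list (get_overflow_list grid r c overflow_list)

-- ===== LEMMAS AND PROOFS =====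

-- B's loop body, and the body of B's whole scan, named for the proof
def pvRunB (grid : List (List Int)) (r c : Int) (acc : List (Int × Int)) : List (Int × Int) :=
  if r < (grid.length : Int) then
    (PySem.List.pyRange r (grid.length : Int) 1).foldl
      (fun a row =>
        pvScanRow grid (grid.length : Int) ((grid.headD []).length : Int) row
          (if row == r then c else 0) a)
      acc
  else acc

lemma pvCount_eq (grid : List (List Int)) (row col : Int) :
    pvCountA grid row col = pvCountB (grid.length : Int) ((grid.headD []).length : Int) row col := by
  simp only [pvCountA, pvCountB, List.foldl, add_zero]
  split_ifs <;> omega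

lemma pvGoA_eq_runB (grid : List (List Int)) (r c : Int) (acc : List (Int × Int)) :
    pvGoA grid r c acc = pvRunB grid r c acc := by
  induction r, c, acc using pvGoA.induct grid with
  | case1 r c acc hr hc ih =>
    simp only [dite_eq_ite] at ih
    rw [pvGoA, dif_pos hr, dif_pos hc, ih]
    conv_rhs => rw [pvRunB, if_pos hr, PySem.List.pyRange_one_cons hr, List.foldl_cons]
    have h1 : (r == r) = true := by simp
    simp only [h1, if_true]
    conv_rhs => rw [pvScanRow]
    rw [dif_pos hc]
    conv_lhs => rw [pvRunB]
    rw [if_pos hr, PySem.List.pyRange_one_cons hr, List.foldl_cons]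
    simp only [h1, if_true, pvCount_eq]
    apply PySem.List.foldl_congr_mem
    intro a row hrow
    have h2 : r + 1 ≤ row := (PySem.List.mem_pyRange_one.mp hrow).1
    have h3 : (row == r) = false := by simp; omega
    simp only [h3, Bool.false_eq_true, if_false]
  | case2 r c acc hr hc ih =>
    rw [pvGoA, dif_pos hr, dif_neg hc, ih]
    conv_rhs => rw [pvRunB, if_pos hr, PySem.List.pyRange_one_cons hr, List.foldl_cons]
    have h1 : (r == r) = true := by simp
    simp only [h1, if_true]
    conv_rhs => rw [pvScanRow]
    rw [dif_neg hc]
    conv_lhs => rw [pvRunB]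
    by_cases hr1 : r + 1 < (grid.length : Int)
    · rw [if_pos hr1]
      apply PySem.List.foldl_congr_mem
      intro a row hrow
      have h2 : r + 1 ≤ row := (PySem.List.mem_pyRange_one.mp hrow).1
      have h3 : (row == r) = false := by simp; omega
      simp only [h3, Bool.false_eq_true, if_false, ite_self]
    · rw [if_neg hr1, PySem.List.pyRange_one_eq_nil (by omega), List.foldl_nil]
  | case3 r c acc hr =>
    rw [pvGoA, dif_neg hr, pvRunB, if_neg hr]

-- ===== VERDICT (by name: the statement is the Claim_ definition above) =====
theorem get_overflow_list_spec : Claim_equal_get_overflow_list := by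
  intro grid r c overflow_list _ _
  unfold Spec_get_overflow_list get_overflow_list get_overflow_list_alt
  rw [pvGoA_eq_runB, pvRunB]
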